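-- pv_equiv track=rewrite | github.com/wonnowone/ARC-EFE | feature_extraction.py | is_symmetric_vertical
-- ===== SOURCE A (Python) =====
-- def is_symmetric_vertical(grid):
--     """Check if grid is symmetric vertically (top-bottom mirror)"""
--     if not grid or not grid[0]:
--         return False
--     height = len(grid)
--     for i in range(height // 2):
--         if grid[i] != grid[height - 1 - i]:
--             return False
--     return True
-- ===== SOURCE B (Python) =====
-- def is_symmetric_vertical(grid):
--     """Check if grid is symmetric vertically (top-bottom mirror)"""
--     if not grid or not grid[0]:
--         return False
--     rows = grid
--     while len(rows) >= 2:
--         if rows[0] != rows[-1]: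
--             return False
--         rows = rows[1:-1]
--     return True
-- ===== Notes on version B (the rewrite author's own statement) =====
-- stated objective: alternative
-- what changed: Replaces the half-height index loop comparing grid[i] with grid[height-1-i] by a both-ends peel: repeatedly compare the first and last row and shrink the working list to its middle slice rows[1:-1] until fewer than two rows remain; no index arithmetic, the maintained state is the shrinking sublist.
import Mathlib
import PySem

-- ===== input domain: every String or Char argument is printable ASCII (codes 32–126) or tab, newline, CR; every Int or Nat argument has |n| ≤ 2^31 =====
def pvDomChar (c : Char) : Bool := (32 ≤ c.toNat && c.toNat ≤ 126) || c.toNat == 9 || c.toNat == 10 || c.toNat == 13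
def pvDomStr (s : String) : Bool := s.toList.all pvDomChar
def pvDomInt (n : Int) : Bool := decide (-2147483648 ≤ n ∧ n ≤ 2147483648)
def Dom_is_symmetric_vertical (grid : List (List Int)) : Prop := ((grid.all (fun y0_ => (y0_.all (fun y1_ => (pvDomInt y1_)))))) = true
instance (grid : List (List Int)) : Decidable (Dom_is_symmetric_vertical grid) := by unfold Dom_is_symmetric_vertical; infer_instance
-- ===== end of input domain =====

-- B replaces A's half-height index loop by a both-ends peel: compare first and
-- last row and shrink to the middle slice rows[1:-1] (alternative decomposition).


-- ===== PORT A =====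
-- for i in range(height // 2): if grid[i] != grid[height-1-i]: return False
def isvLoop (grid : List (List Int)) (height i : Nat) : Bool :=
  if _h : i < height / 2 then
    if grid.getD i [] ≠ grid.getD (height - 1 - i) [] then false
    else isvLoop grid height (i + 1)
  else true
termination_by height / 2 - i

def is_symmetric_vertical (grid : List (List Int)) : Bool :=
  if grid = [] ∨ grid.headD [] = [] then false
  else
    let height := grid.length
    isvLoop grid height 0

-- ===== PORT B =====
-- while len(rows) >= 2: if rows[0] != rows[-1]: return False; rows = rows[1:-1]
-- (for len(rows) ≥ 2, the slice rows[1:-1] is exactly rows.tail.dropLast)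
def peelLoop (rows : List (List Int)) : Bool :=
  if _h : 2 ≤ rows.length then
    if rows.headD [] ≠ rows.getLastD [] then false
    else peelLoop rows.tail.dropLast
  else true
termination_by rows.length
decreasing_by simp [List.length_dropLast, List.length_tail]; omega

def is_symmetric_vertical_alt (grid : List (List Int)) : Bool :=
  if grid = [] ∨ grid.headD [] = [] then false
  else peelLoop grid

-- ===== PRECONDITION & SPEC =====
def Spec_is_symmetric_vertical (grid : List (List Int)) (out : Bool) : Prop := out = is_symmetric_vertical_alt grid
instance (grid : List (List Int)) (out : Bool) : Decidable (Spec_is_symmetric_vertical grid out) := by unfold Spec_is_symmetric_vertical; infer_instance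

-- ===== CLAIM (what is proved, stated in full; the proofs are below) =====
def Claim_equal_is_symmetric_vertical : Prop := ∀ (grid : List (List Int)), Dom_is_symmetric_vertical grid → Spec_is_symmetric_vertical grid (is_symmetric_vertical grid)

-- ===== LEMMAS AND PROOFS =====

-- A's loop from index i decides the remaining pairwise mirror conditions.
theorem isvLoop_eq (grid : List (List Int)) (height i : Nat) :
    isvLoop grid height i =
      decide (∀ j, i ≤ j → j < height / 2 → grid.getD j [] = grid.getD (height - 1 - j) []) := by
  rw [isvLoop]
  split
  · rename_i h
    by_cases hij : grid.getD i [] = grid.getD (height - 1 - i) []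
    · rw [if_neg (not_not_intro hij), isvLoop_eq grid height (i + 1)]
      congr 1
      apply propext
      constructor
      · intro H j hle hlt
        rcases Nat.eq_or_lt_of_le hle with rfl | hlt'
        · exact hij
        · exact H j hlt' hlt
      · intro H j hle hlt
        exact H j (Nat.le_of_succ_le hle) hlt
    · rw [if_pos hij]
      symm
      simp only [decide_eq_false_iff_not]
      intro H
      exact hij (H i le_rfl h)
  · rename_i h
    symm
    simp only [decide_eq_true_iff]
    intro j hle hlt
    omega
termination_by height / 2 - i

-- Palindrome characterisation: equality with the reverse ↔ the first-half mirror pairs agree.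
theorem reverse_eq_iff_half (l : List (List Int)) :
    l = l.reverse ↔
      ∀ j, j < l.length / 2 → l.getD j [] = l.getD (l.length - 1 - j) [] := by
  constructor
  · intro h j hj
    have hj' : j < l.length := by omega
    have h2 : l.getD j ([] : List Int) = l.reverse.getD j [] := by rw [← h]
    rw [h2, List.getD_eq_getElem l.reverse [] (by simpa using hj'),
        List.getD_eq_getElem l [] (show l.length - 1 - j < l.length by omega),
        List.getElem_reverse]
  · intro H
    apply List.ext_getElem (by simp)
    intro j h1 h2
    rw [List.getElem_reverse]
    have hj : j < l.length := h1
    by_cases hcase : j < l.length / 2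
    · have := H j hcase
      rw [List.getD_eq_getElem l [] h1,
          List.getD_eq_getElem l [] (show l.length - 1 - j < l.length by omega)] at this
      exact this
    · rcases Nat.lt_or_ge (l.length - 1 - j) (l.length / 2) with hlt | hge
      · have := H (l.length - 1 - j) hlt
        rw [List.getD_eq_getElem l [] (show l.length - 1 - j < l.length by omega),
            List.getD_eq_getElem l [] (show l.length - 1 - (l.length - 1 - j) < l.length by omega)] at this
        have hjj : l.length - 1 - (l.length - 1 - j) = j := by omega
        simp only [hjj] at this
        exact this.symm
      · have heq : l.length - 1 - j = j := by omega
        simp [heq]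

-- Peeling one row from each end of a ≥2-row list preserves palindromicity ↔.
theorem cons_concat_reverse_iff (a b : List Int) (m : List (List Int)) :
    (a :: (m ++ [b])) = (a :: (m ++ [b])).reverse ↔ (a = b ∧ m = m.reverse) := by
  constructor
  · intro h
    have h' : a :: (m ++ [b]) = b :: (m.reverse ++ [a]) := by
      simpa [List.reverse_cons, List.reverse_append] using h
    have hab : a = b := by injection h'
    have ht : m ++ [b] = m.reverse ++ [a] := by injection h'
    subst hab
    exact ⟨rfl, by simpa using ht⟩
  · rintro ⟨rfl, hm⟩
    simp [List.reverse_cons, List.reverse_append]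
    exact hm
  
-- B's peel loop decides whether the list equals its reverse.
theorem peelLoop_eq (rows : List (List Int)) :
    peelLoop rows = decide (rows = rows.reverse) := by
  rw [peelLoop]
  split
  · rename_i h2
    -- rows has ≥ 2 elements: rows = a :: (m ++ [b])
    obtain ⟨a, t, rfl⟩ : ∃ a t, rows = a :: t := by
      cases rows with
      | nil => simp at h2
      | cons a t => exact ⟨a, t, rfl⟩
    have ht : t ≠ [] := by intro h; subst h; simp at h2
    obtain ⟨m, b, rfl⟩ : ∃ m b, t = m ++ [b] :=
      ⟨t.dropLast, t.getLast ht, (t.dropLast_append_getLast ht).symm⟩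
    have hhead : (a :: (m ++ [b])).headD ([] : List Int) = a := rfl
    have hlast : (a :: (m ++ [b])).getLastD ([] : List Int) = b := by
      rw [show a :: (m ++ [b]) = (a :: m) ++ [b] from rfl,
          List.getLastD_eq_getLast?, List.getLast?_concat]
      rfl
    have htail : (a :: (m ++ [b])).tail.dropLast = m := by
      simp
    rw [hhead, hlast, htail]
    by_cases hab : a = b
    · rw [if_neg (not_not_intro hab), peelLoop_eq m]
      congr 1
      apply propext
      rw [cons_concat_reverse_iff]
      exact ⟨fun hm => ⟨hab, hm⟩, fun h => h.2⟩
    · rw [if_pos hab]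
      symm
      simp only [decide_eq_false_iff_not]
      rw [cons_concat_reverse_iff]
      exact fun h => hab h.1
  · rename_i h2
    -- fewer than 2 rows: always a palindrome
    symm
    simp only [decide_eq_true_iff]
    cases rows with
    | nil => rfl
    | cons a t =>
      cases t with
      | nil => rfl
      | cons b u => exact absurd (by simp) h2
termination_by rows.length
decreasing_by subst_vars; simp [List.length_append]

-- ===== VERDICT (by name: the statement is the Claim_ definition above) =====
theorem is_symmetric_vertical_spec : Claim_equal_is_symmetric_vertical := by
  intro grid _
  unfold Spec_is_symmetric_vertical is_symmetric_vertical is_symmetric_vertical_alt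
  split
  · rfl
  · rw [isvLoop_eq, peelLoop_eq]
    congr 1
    apply propext
    rw [reverse_eq_iff_half]
    constructor
    · intro H j hj
      exact H j (Nat.zero_le j) hj
    · intro H j _ hj
      exact H j hj
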